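-- pv_equiv track=rewrite | github.com/aarnav-hariramani/eBay-2025-ML | src/ebayner/utils.py | bio_from_tag_sequence
-- ===== SOURCE A (Python) =====
-- from typing import List, Dict, Tuple, Iterable
--
-- def bio_from_tag_sequence(tags: List[str]) -> List[str]:
--     """
--     Annexure rule:
--     - empty tag => continuation of previous entity (I-<prev>)
--     - same non-empty tag repeated in consecutive rows => different entities => B- for each
--     """
--     bio = []
--     last_non_empty = None
--     for t in tags:
--         if t == "":
--             if last_non_empty is None:
--                 bio.append("O")
--             else:
--                 bio.append(f"I-{last_non_empty}")
--         else:
--             bio.append(f"B-{t}")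
--             last_non_empty = t
--     return bio
-- ===== SOURCE B (Python) =====
-- def bio_from_tag_sequence(tags):
--     # pass 1: forward-fill the active entity; filled[i] = last non-empty tag strictly before index i (or None)
--     filled = []
--     cur = None
--     for t in tags:
--         filled.append(cur)
--         if t != "":
--             cur = t
--     # pass 2: stateless label generation
--     return [f"B-{t}" if t != "" else (f"I-{f}" if f is not None else "O")
--             for t, f in zip(tags, filled)]
-- ===== Notes on version B (the rewrite author's own statement) =====
-- stated objective: alternative
-- what changed: Replaces A's single fused loop with mutable carry-state by two passes: a forward-fill pass computing the active entity before each row, then a stateless comprehension over zipped (tag, fill) pairs producing the labels.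
import Mathlib
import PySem

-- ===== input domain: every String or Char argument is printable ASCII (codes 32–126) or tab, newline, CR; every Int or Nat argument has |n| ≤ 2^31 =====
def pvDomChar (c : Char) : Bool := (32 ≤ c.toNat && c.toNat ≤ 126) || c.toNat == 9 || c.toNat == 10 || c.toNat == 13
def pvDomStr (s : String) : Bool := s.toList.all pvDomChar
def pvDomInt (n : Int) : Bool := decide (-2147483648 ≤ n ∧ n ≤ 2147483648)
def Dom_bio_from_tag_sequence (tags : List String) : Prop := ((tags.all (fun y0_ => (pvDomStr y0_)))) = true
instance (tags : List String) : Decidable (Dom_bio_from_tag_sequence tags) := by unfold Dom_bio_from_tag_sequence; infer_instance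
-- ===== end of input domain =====

-- B replaces A's single fused loop (carrying last_non_empty while appending labels) with two separate passes — a forward-fill of the active entity, then a stateless label map over zipped pairs — same cost, different decomposition.


-- ===== PORT A =====
def bio_from_tag_sequence (tags : List String) : List String :=
  (tags.foldl (fun (st : List String × Option String) t =>
    if t == "" then
      match st.2 with
      | none => (st.1 ++ ["O"], st.2)
      | some p => (st.1 ++ ["I-" ++ p], st.2)
    else (st.1 ++ ["B-" ++ t], some t)) ([], none)).1

-- ===== PORT B =====
-- pass 1: forward-fill the active entity (fill before each row)
def pvFFill (cur : Option String) : List String → List (Option String)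
  | [] => []
  | t :: rest => cur :: pvFFill (if t == "" then cur else some t) rest

def bio_from_tag_sequence_alt (tags : List String) : List String :=
  -- pass 2: stateless label generation over zipped pairs
  (tags.zip (pvFFill none tags)).map (fun tf =>
    if tf.1 != "" then "B-" ++ tf.1
    else match tf.2 with
      | some f => "I-" ++ f
      | none => "O")

-- ===== PRECONDITION & SPEC =====
def Spec_bio_from_tag_sequence (tags : List String) (out : List String) : Prop := out = bio_from_tag_sequence_alt tags
instance (tags : List String) (out : List String) : Decidable (Spec_bio_from_tag_sequence tags out) := by unfold Spec_bio_from_tag_sequence; infer_instance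

-- ===== CLAIM (what is proved, stated in full; the proofs are below) =====
def Claim_equal_bio_from_tag_sequence : Prop := ∀ (tags : List String), Dom_bio_from_tag_sequence tags → Spec_bio_from_tag_sequence tags (bio_from_tag_sequence tags)

-- ===== LEMMAS AND PROOFS =====

-- ===== VERDICT (by name: the statement is the Claim_ definition above) =====
theorem pvLoop_eq (tags : List String) : ∀ (bio : List String) (cur : Option String),
    (tags.foldl (fun (st : List String × Option String) t =>
      if t == "" then
        match st.2 with
        | none => (st.1 ++ ["O"], st.2)
        | some p => (st.1 ++ ["I-" ++ p], st.2)
      else (st.1 ++ ["B-" ++ t], some t)) (bio, cur)).1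
    = bio ++ (tags.zip (pvFFill cur tags)).map (fun tf =>
        if tf.1 != "" then "B-" ++ tf.1
        else match tf.2 with
          | some f => "I-" ++ f
          | none => "O") := by
  induction tags with
  | nil => simp [pvFFill]
  | cons t rest ih =>
    intro bio cur
    by_cases h : t = ""
    · subst h
      cases cur with
      | none =>
        show (List.foldl _ (bio ++ ["O"], none) rest).1 = _
        rw [ih]; simp [pvFFill]
      | some p =>
        show (List.foldl _ (bio ++ ["I-" ++ p], some p) rest).1 = _
        rw [ih]; simp [pvFFill]
    · have hb : (t == "") = false := by simp [h]
      show (List.foldl _ (if (t == "") = true then _ else (bio ++ ["B-" ++ t], some t)) rest).1 = _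
      rw [hb]
      show (List.foldl _ (bio ++ ["B-" ++ t], some t) rest).1 = _
      rw [ih]; simp [pvFFill, hb]
      exact fun h' => absurd h' h

theorem bio_from_tag_sequence_spec : Claim_equal_bio_from_tag_sequence := by
  intro tags _
  unfold Spec_bio_from_tag_sequence bio_from_tag_sequence bio_from_tag_sequence_alt
  simpa using pvLoop_eq tags [] none
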